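-- pv_equiv track=rewrite | github.com/MarouaneBenabdelkader/bitpacking | src/bitpacking/overflow.py | _decompress_crossing
-- ===== SOURCE A (Python) =====
-- def _decompress_crossing(words: list[int], k: int, n: int) -> list[int]:
--     """Decompress using crossing method."""
--     mask = (1 << k) - 1
--     result = []
--
--     for i in range(n):
--         bit_offset = i * k
--         word_idx = bit_offset // 32
--         bit_in_word = bit_offset % 32
--         bits_remaining = 32 - bit_in_word
--
--         if k <= bits_remaining:
--             value = (words[word_idx] >> bit_in_word) & mask
--         else:
--             lower_mask = (1 << bits_remaining) - 1
--             lower_bits = (words[word_idx] >> bit_in_word) & lower_mask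
--             upper_bits_count = k - bits_remaining
--             upper_mask = (1 << upper_bits_count) - 1
--             upper_bits = words[word_idx + 1] & upper_mask
--             value = (upper_bits << bits_remaining) | lower_bits
--
--         result.append(value)
--
--     return result
-- ===== SOURCE B (Python) =====
-- def _decompress_crossing(words: list[int], k: int, n: int) -> list[int]:
--     """Decompress by streaming a shift-register bit buffer over the words."""
--     mask = (1 << k) - 1
--     buffer = 0
--     bits = 0
--     j = 0
--     result = []
--     for _ in range(n):
--         while bits < k:
--             buffer |= (words[j] & 0xFFFFFFFF) << bits
--             bits += 32
--             j += 1
--         result.append(buffer & mask)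
--         buffer >>= k
--         bits -= k
--     return result
-- ===== Notes on version B (the rewrite author's own statement) =====
-- stated objective: alternative
-- what changed: Replaces per-index division/modulo word addressing and the explicit word-crossing branch by a sequential shift-register: a bit buffer is refilled word by word and each value is peeled off with one mask and shift; Pre_ restricts to the natural domain k <= 32 (k-bit fields packed in 32-bit words), since for k > 32 A reads only two words per field so its values are not the packed fields and B's streaming reader may need words A never touches.
-- outside the precondition, e.g. on _decompress_crossing([0, -1, 4], 65, 1): A returns [36893488143124135936], B returns [18446744069414584320]; on _decompress_crossing([1, 2], 65, 1): A returns [8589934593], B raises IndexError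
-- crash fix: On k = 0 with n > 0 and empty words, A raises IndexError (it still indexes words[0] although it needs no bits) while B never touches the word list and returns a list of n zeros. — e.g. on _decompress_crossing([], 0, 2): A raises IndexError, B returns [0, 0]
import Mathlib
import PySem

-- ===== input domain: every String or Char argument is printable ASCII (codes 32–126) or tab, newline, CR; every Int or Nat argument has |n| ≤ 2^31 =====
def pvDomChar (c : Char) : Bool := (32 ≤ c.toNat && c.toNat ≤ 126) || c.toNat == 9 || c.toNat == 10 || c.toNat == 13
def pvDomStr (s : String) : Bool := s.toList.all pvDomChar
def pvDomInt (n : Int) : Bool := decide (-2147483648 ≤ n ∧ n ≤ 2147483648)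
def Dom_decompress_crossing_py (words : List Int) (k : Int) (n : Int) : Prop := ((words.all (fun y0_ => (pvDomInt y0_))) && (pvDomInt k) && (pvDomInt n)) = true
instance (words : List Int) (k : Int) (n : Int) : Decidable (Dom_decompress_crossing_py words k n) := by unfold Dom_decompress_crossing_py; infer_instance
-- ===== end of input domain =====

-- B replaces per-index division/modulo word addressing and the explicit crossing branch
-- by a sequential shift-register bit buffer refilled word by word (alternative decomposition, same cost).

-- ===== PORT A =====
def decompress_crossing_py (words : List Int) (k : Int) (n : Int) : List Int :=
  let mask : Int := ((1 : Int) <<< k.toNat) - 1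
  (PySem.List.pyRange 0 n 1).foldl (fun result i =>
    let bit_offset := i * k
    let word_idx := PySem.Int.floordiv bit_offset 32
    let bit_in_word := PySem.Int.mod bit_offset 32
    let bits_remaining := 32 - bit_in_word
    let value :=
      if k ≤ bits_remaining then
        PySem.Int.band ((PySem.List.pyGetD words word_idx 0) >>> bit_in_word.toNat) mask
      else
        let lower_mask := ((1 : Int) <<< bits_remaining.toNat) - 1
        let lower_bits := PySem.Int.band ((PySem.List.pyGetD words word_idx 0) >>> bit_in_word.toNat) lower_mask
        let upper_bits_count := k - bits_remaining
        let upper_mask := ((1 : Int) <<< upper_bits_count.toNat) - 1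
        let upper_bits := PySem.Int.band (PySem.List.pyGetD words (word_idx + 1) 0) upper_mask
        PySem.Int.bor (upper_bits <<< bits_remaining.toNat) lower_bits
    result ++ [value]) []

-- ===== PORT B =====
-- the inner `while bits < k` loop of Source B
def pvFill (words : List Int) (k : Int) (buffer : Int) (bits : Int) (j : Int) : Int × Int × Int :=
  if bits < k then
    pvFill words k
      (PySem.Int.bor buffer ((PySem.Int.band (PySem.List.pyGetD words j 0) 4294967295) <<< bits.toNat))
      (bits + 32) (j + 1)
  else (buffer, bits, j)
termination_by (k - bits).toNat
decreasing_by omega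

def decompress_crossing_py_alt (words : List Int) (k : Int) (n : Int) : List Int :=
  let mask : Int := ((1 : Int) <<< k.toNat) - 1
  ((PySem.List.pyRange 0 n 1).foldl
    (fun st _ =>
      let f := pvFill words k st.1 st.2.1 st.2.2.1
      (f.1 >>> k.toNat, f.2.1 - k, f.2.2, st.2.2.2 ++ [PySem.Int.band f.1 mask]))
    ((0 : Int), (0 : Int), (0 : Int), ([] : List Int))).2.2.2

-- ===== PRECONDITION & SPEC =====
-- Pre_ excludes: k < 0 (Python's 1 << k raises ValueError); word indices A reads being out of
-- range (IndexError), which for k > 0 is exactly (n*k-1)//32 < len(words) and for k = 0, n > 0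
-- is words ≠ []; and — a stated narrowing to the natural domain of k-bit fields packed in
-- 32-bit words — k > 32, where A reads only two words per field so its values are not the
-- packed fields and B's streaming reader may need words A never touches (see claim cites).
def Pre_decompress_crossing_py (words : List Int) (k : Int) (n : Int) : Prop :=
  0 ≤ k ∧ k ≤ 32 ∧ (0 < n → (if k = 0 then words ≠ [] else (n * k - 1) / 32 < (words.length : Int)))
instance (words : List Int) (k : Int) (n : Int) : Decidable (Pre_decompress_crossing_py words k n) := by
  unfold Pre_decompress_crossing_py; infer_instance

def pvWitness_decompress_crossing_py : List Int × Int × Int := ([1, 2, 3], 8, 4)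

-- On k = 0 with n > 0 and empty words, A raises IndexError (it still indexes words[0]
-- although it needs no bits) while B never touches the word list and returns n zeros.
def Raises_decompress_crossing_py (words : List Int) (k : Int) (n : Int) : Prop :=
  words = [] ∧ k = 0 ∧ 0 < n
instance (words : List Int) (k : Int) (n : Int) : Decidable (Raises_decompress_crossing_py words k n) := by
  unfold Raises_decompress_crossing_py; infer_instance
def pvRaiseWitness_decompress_crossing_py : List Int × Int × Int := ([], 0, 2)
def pvRaiseWitnessOut_decompress_crossing_py : List Int := [0, 0]

def Spec_decompress_crossing_py (words : List Int) (k : Int) (n : Int) (out : List Int) : Prop :=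
  out = decompress_crossing_py_alt words k n
instance (words : List Int) (k : Int) (n : Int) (out : List Int) : Decidable (Spec_decompress_crossing_py words k n out) := by
  unfold Spec_decompress_crossing_py; infer_instance

-- ===== CLAIM (what is proved, stated in full; the proofs are below) =====
def Claim_equal_decompress_crossing_py : Prop := ∀ (words : List Int) (k : Int) (n : Int), Dom_decompress_crossing_py words k n → Pre_decompress_crossing_py words k n → Spec_decompress_crossing_py words k n (decompress_crossing_py words k n)

def Claim_raises_decompress_crossing_py : Prop := (∀ (words : List Int) (k : Int) (n : Int), Dom_decompress_crossing_py words k n → Raises_decompress_crossing_py words k n → ¬ Pre_decompress_crossing_py words k n) ∧ (Dom_decompress_crossing_py (pvRaiseWitness_decompress_crossing_py.1) (pvRaiseWitness_decompress_crossing_py.2.1) (pvRaiseWitness_decompress_crossing_py.2.2) ∧ Raises_decompress_crossing_py (pvRaiseWitness_decompress_crossing_py.1) (pvRaiseWitness_decompress_crossing_py.2.1) (pvRaiseWitness_decompress_crossing_py.2.2) ∧ decompress_crossing_py_alt (pvRaiseWitness_decompress_crossing_py.1) (pvRaiseWitness_decompress_crossing_py.2.1) (pvRaiseWitness_decompress_crossing_py.2.2)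 = pvRaiseWitnessOut_decompress_crossing_py)

-- ===== LEMMAS AND PROOFS =====

lemma pv_ext_mod (x m a c : Nat) (h : a + c ≤ m) :
    x % 2 ^ m / 2 ^ a % 2 ^ c = x / 2 ^ a % 2 ^ c := by
  have hx : x = x % 2 ^ m + (2 ^ (m - a) * (x / 2 ^ m)) * 2 ^ a := by
    have : (2 ^ (m - a) * (x / 2 ^ m)) * 2 ^ a = 2 ^ m * (x / 2 ^ m) := by
      rw [mul_right_comm, ← pow_add]; congr 2; omega
    rw [this]; exact (Nat.mod_add_div x (2 ^ m)).symm
  conv_rhs => rw [hx]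
  rw [Nat.add_mul_div_right _ _ (Nat.two_pow_pos a)]
  have : 2 ^ (m - a) * (x / 2 ^ m) = (2 ^ (m - a - c) * (x / 2 ^ m)) * 2 ^ c := by
    rw [mul_right_comm, ← pow_add]; congr 2; omega
  rw [this, Nat.add_mul_mod_self_right]

lemma pv_ext_split (x a c1 c2 : Nat) :
    x / 2 ^ a % 2 ^ (c1 + c2) = x / 2 ^ a % 2 ^ c1 + 2 ^ c1 * (x / 2 ^ (a + c1) % 2 ^ c2) := by
  rw [pow_add, Nat.mod_mul, pow_add, ← Nat.div_div_eq_div_mul]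


def pvW (words : List Int) (t : Nat) : Nat := ((PySem.List.pyGetD words (t : Int) 0) % 4294967296).toNat
def pvT (words : List Int) : Nat → Nat
  | 0 => 0
  | j + 1 => pvT words j + pvW words j * 2 ^ (32 * j)

lemma pvW_lt (words : List Int) (t : Nat) : pvW words t < 2 ^ 32 := by
  unfold pvW
  have h1 := Int.emod_nonneg (PySem.List.pyGetD words (t : Int) 0) (show (4294967296:Int) ≠ 0 by norm_num)
  have h2 := Int.emod_lt_of_pos (PySem.List.pyGetD words (t : Int) 0) (show (0:Int) < 4294967296 by norm_num)
  omega

lemma pvT_lt (words : List Int) (j : Nat) : pvT words j < 2 ^ (32 * j) := by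
  induction j with
  | zero => simp [pvT]
  | succ j ih =>
    have hW := pvW_lt words j
    have : pvT words (j+1) = pvT words j + pvW words j * 2 ^ (32 * j) := rfl
    rw [this]
    have hpow : 2 ^ (32 * (j + 1)) = 2 ^ 32 * 2 ^ (32 * j) := by rw [← pow_add]; congr 1; omega
    rw [hpow]
    nlinarith [Nat.two_pow_pos (32 * j)]

lemma pvT_mod (words : List Int) {j J : Nat} (h : j ≤ J) :
    pvT words j = pvT words J % 2 ^ (32 * j) := by
  obtain ⟨d, rfl⟩ := Nat.exists_eq_add_of_le h
  induction d with
  | zero => simp [Nat.mod_eq_of_lt (pvT_lt words j)]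
  | succ d ih =>
    have : pvT words (j + (d+1)) = pvT words (j + d) + pvW words (j+d) * 2 ^ (32 * (j+d)) := rfl
    rw [this]
    have hpow : pvW words (j+d) * 2 ^ (32 * (j + d)) = (pvW words (j+d) * 2 ^ (32 * d)) * 2 ^ (32 * j) := by
      rw [mul_assoc, ← pow_add]; congr 2; omega
    rw [hpow, Nat.add_mul_mod_self_right]
    exact ih (by omega)



lemma pv_band_mask (x : Int) (c : Nat) : PySem.Int.band x ((2:Int) ^ c - 1) = x % (2:Int) ^ c := by
  have hc : ((2 ^ c : Nat) : Int) = (2:Int) ^ c := by push_cast; ring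
  have hpos : (0:Int) < (2:Int) ^ c := by positivity
  have h1 : ((2:Int) ^ c - 1).toNat = 2 ^ c - 1 := by omega
  rcases le_or_gt 0 x with hx | hx
  · rw [PySem.Int.band_of_nonneg hx (by omega)]
    rw [h1, Nat.and_two_pow_sub_one_eq_mod]
    have h2 : x = (x.toNat : Int) := by omega
    rw [h2, ← hc]
    norm_cast
  · unfold PySem.Int.band
    rw [if_neg (by omega), if_pos (by omega)]
    rw [h1, Nat.land_comm, Nat.and_two_pow_sub_one_eq_mod]
    set y : Nat := (-x - 1).toNat with hy
    have hxy : x = -1 - (y : Int) := by omega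
    have hysplit : (y : Int) = ((2:Int) ^ c) * ((y / 2 ^ c : Nat) : Int) + ((y % 2 ^ c : Nat) : Int) := by
      have h := Nat.div_add_mod y (2 ^ c)
      have h2 : ((2 ^ c * (y / 2 ^ c) + y % 2 ^ c : Nat) : Int) = (y : Int) := by rw [h]
      rw [← h2]; push_cast; ring
    have hmlt : y % 2 ^ c < 2 ^ c := Nat.mod_lt _ (by positivity)
    have hdecomp : x = ((2:Int) ^ c - 1 - ((y % 2 ^ c : Nat) : Int)) + (-((y / 2 ^ c : Nat) : Int) - 1) * (2:Int) ^ c := by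
      rw [hxy, hysplit]; ring
    have hfin : x % (2:Int) ^ c = (2:Int) ^ c - 1 - ((y % 2 ^ c : Nat) : Int) := by
      conv_lhs => rw [hdecomp]
      rw [Int.add_mul_emod_self_right]
      apply Int.emod_eq_of_lt <;> omega
    rw [hfin]
    omega

lemma pv_lor_eq_add (a b n : Nat) (ha : a < 2 ^ n) : a ||| (b * 2 ^ n) = a + b * 2 ^ n := by
  apply Nat.eq_of_testBit_eq
  intro i
  rw [Nat.testBit_lor, Nat.testBit_mul_two_pow]
  rcases Nat.lt_or_ge i n with h | h
  · have h1 : (a + b * 2 ^ n).testBit i = ((a + b * 2 ^ n) % 2 ^ n).testBit i := by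
      rw [Nat.testBit_mod_two_pow]; simp [h]
    rw [h1, Nat.add_mul_mod_self_right, Nat.mod_eq_of_lt ha]
    simp [Nat.not_le.mpr h]
  · have h1 : (a + b * 2 ^ n).testBit i = ((a + b * 2 ^ n) / 2 ^ n).testBit (i - n) := by
      rw [Nat.testBit_div_two_pow]; congr 1; omega
    rw [h1, Nat.add_mul_div_right _ _ (Nat.two_pow_pos n), Nat.div_eq_of_lt ha]
    simp [h, Nat.testBit_lt_two_pow (lt_of_lt_of_le ha (Nat.pow_le_pow_right (by norm_num) h))]

lemma pv_bor_eq_add (a b : Int) (n : Nat) (ha0 : 0 ≤ a) (ha : a < 2 ^ n) (hb : 0 ≤ b) :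
    PySem.Int.bor a (b * 2 ^ n) = a + b * 2 ^ n := by
  have hcn : ((2 ^ n : Nat) : Int) = (2:Int) ^ n := by push_cast; ring
  have hbn : (0:Int) ≤ b * 2 ^ n := by positivity
  rw [PySem.Int.bor_of_nonneg ha0 hbn]
  have h1 : (b * 2 ^ n).toNat = b.toNat * 2 ^ n := by
    rw [← hcn, ← Int.toNat_of_nonneg hb]
    norm_cast
  have h3 : a.toNat < 2 ^ n := by omega
  rw [h1, pv_lor_eq_add _ _ _ h3]
  rw [Nat.cast_add, Nat.cast_mul, hcn, Int.toNat_of_nonneg ha0, Int.toNat_of_nonneg hb]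

lemma pv_ext_mod_int (x : Int) (m a c : Nat) (h : a + c ≤ m) :
    x % (2:Int) ^ m / (2:Int) ^ a % (2:Int) ^ c = x / (2:Int) ^ a % (2:Int) ^ c := by
  have hx : x = x % (2:Int) ^ m + ((2:Int) ^ (m - a) * (x / (2:Int) ^ m)) * (2:Int) ^ a := by
    have epow : (2:Int) ^ (m - a) * (2:Int) ^ a = (2:Int) ^ m := by
      rw [← pow_add]; congr 1; omega
    have e : ((2:Int) ^ (m - a) * (x / (2:Int) ^ m)) * (2:Int) ^ a = (x / (2:Int) ^ m) * (2:Int) ^ m := by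
      rw [← epow]; ring
    rw [e]; exact (Int.emod_add_ediv_mul x ((2:Int) ^ m)).symm
  conv_rhs => rw [hx]
  rw [Int.add_mul_ediv_right _ _ (by positivity : ((2:Int) ^ a) ≠ 0)]
  have e2 : (2:Int) ^ (m - a) * (x / (2:Int) ^ m) = ((2:Int) ^ (m - a - c) * (x / (2:Int) ^ m)) * (2:Int) ^ c := by
    rw [mul_right_comm, ← pow_add]; congr 2; omega
  rw [e2, Int.add_mul_emod_self_right]

lemma pv_slice_word (words : List Int) (t b c : Nat) (h : b + c ≤ 32) :
    PySem.List.pyGetD words (t : Int) 0 / (2:Int) ^ b % (2:Int) ^ c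
      = ((pvW words t / 2 ^ b % 2 ^ c : Nat) : Int) := by
  set x := PySem.List.pyGetD words (t : Int) 0 with hx
  have h1 : x / (2:Int) ^ b % (2:Int) ^ c = x % (2:Int) ^ 32 / (2:Int) ^ b % (2:Int) ^ c :=
    (pv_ext_mod_int x 32 b c h).symm
  have h2 : x % (2:Int) ^ 32 = ((pvW words t : Nat) : Int) := by
    unfold pvW
    rw [← hx]
    have := Int.emod_nonneg x (show (4294967296:Int) ≠ 0 by norm_num)
    omega
  rw [h1, h2]
  push_cast [Int.natCast_div]
  norm_cast

def pvRef (words : List Int) (kn : Nat) (i : Nat) : Nat :=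
  pvT words (i + 1) / 2 ^ (i * kn) % 2 ^ kn

lemma pvW_slice (words : List Int) {t J : Nat} (h : t < J) :
    pvW words t = pvT words J / 2 ^ (32 * t) % 2 ^ 32 := by
  have h1 : pvT words (t + 1) = pvT words J % 2 ^ (32 * (t + 1)) := pvT_mod words h
  have h2 : pvT words J % 2 ^ (32 * (t+1)) / 2 ^ (32 * t) % 2 ^ 32
      = pvT words J / 2 ^ (32 * t) % 2 ^ 32 := pv_ext_mod _ _ _ _ (by omega)
  rw [← h2, ← h1]
  have h3 : pvT words (t + 1) = pvT words t + (pvW words t) * 2 ^ (32 * t) := rfl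
  rw [h3, Nat.add_mul_div_right _ _ (Nat.two_pow_pos _),
      Nat.div_eq_of_lt (pvT_lt words t), Nat.zero_add, Nat.mod_eq_of_lt (pvW_lt words t)]

-- any long-enough stream prefix yields the same field
lemma pvRef_stream (words : List Int) (kn : Nat) (hk : kn ≤ 32) (i : Nat) {J : Nat}
    (hJ : i * kn + kn ≤ 32 * J) :
    pvT words J / 2 ^ (i * kn) % 2 ^ kn = pvRef words kn i := by
  unfold pvRef
  set K := max J (i + 1) with hK
  have h1 : pvT words J = pvT words K % 2 ^ (32 * J) := pvT_mod words (le_max_left _ _)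
  have h2 : pvT words (i + 1) = pvT words K % 2 ^ (32 * (i + 1)) := pvT_mod words (le_max_right _ _)
  have hii : i * kn ≤ i * 32 := Nat.mul_le_mul_left i hk
  rw [h1, h2, pv_ext_mod _ _ _ _ (by omega), pv_ext_mod _ _ _ _ (by omega)]

lemma pv_floordiv_cast (o : Nat) : PySem.Int.floordiv ((o : Nat) : Int) 32 = (((o / 32 : Nat) : Nat) : Int) := by
  unfold PySem.Int.floordiv
  rw [Int.fdiv_eq_ediv]
  simp

lemma pv_mod_cast (o : Nat) : PySem.Int.mod ((o : Nat) : Int) 32 = (((o % 32 : Nat) : Nat) : Int) := by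
  unfold PySem.Int.mod
  rw [Int.fmod_eq_emod]
  simp

lemma pv_slice_chain (words : List Int) (o w b c : Nat) (hw : 32 * w + b = o) (hbc : b + c ≤ 32) (i : Nat) (hwi : w < i + 1) :
    pvW words w / 2 ^ b % 2 ^ c = pvT words (i + 1) / 2 ^ o % 2 ^ c := by
  rw [pvW_slice words hwi, pv_ext_mod _ _ _ _ hbc, Nat.div_div_eq_div_mul, ← pow_add, hw]

lemma pvA_value (words : List Int) (kn : Nat) (hk : kn ≤ 32) (i : Nat) :
    (if (kn : Int) ≤ 32 - PySem.Int.mod ((i : Int) * (kn : Int)) 32 then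
       PySem.Int.band
         ((PySem.List.pyGetD words (PySem.Int.floordiv ((i : Int) * (kn : Int)) 32) 0)
            >>> (PySem.Int.mod ((i : Int) * (kn : Int)) 32).toNat)
         (((1 : Int) <<< kn) - 1)
     else
       PySem.Int.bor
         ((PySem.Int.band
             (PySem.List.pyGetD words (PySem.Int.floordiv ((i : Int) * (kn : Int)) 32 + 1) 0)
             (((1 : Int) <<< ((kn : Int) - (32 - PySem.Int.mod ((i : Int) * (kn : Int)) 32)).toNat) - 1))
            <<< (32 - PySem.Int.mod ((i : Int) * (kn : Int)) 32).toNat)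
         (PySem.Int.band
            ((PySem.List.pyGetD words (PySem.Int.floordiv ((i : Int) * (kn : Int)) 32) 0)
               >>> (PySem.Int.mod ((i : Int) * (kn : Int)) 32).toNat)
            (((1 : Int) <<< (32 - PySem.Int.mod ((i : Int) * (kn : Int)) 32).toNat) - 1)))
    = ((pvRef words kn i : Nat) : Int) := by
  have hcast : (i : Int) * (kn : Int) = ((i * kn : Nat) : Int) := by push_cast; ring
  set o : Nat := i * kn with hodef
  set w : Nat := o / 32 with hwdef
  set b : Nat := o % 32 with hbdef
  have hwb : 32 * w + b = o := Nat.div_add_mod o 32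
  have hblt : b < 32 := Nat.mod_lt _ (by norm_num)
  have hio : o ≤ 32 * i := by rw [hodef]; calc i * kn ≤ i * 32 := Nat.mul_le_mul_left i hk
                                              _ = 32 * i := by ring
  have hwi : w ≤ i := by omega
  rw [hcast, pv_floordiv_cast, pv_mod_cast]
  have hb_toNat : (((b : Nat) : Int)).toNat = b := by simp
  have hshift1 : ((1 : Int) <<< kn) - 1 = (2:Int) ^ kn - 1 := by rw [Int.shiftLeft_eq]; ring
  by_cases hcase : (kn : Int) ≤ 32 - ((b : Nat) : Int)
  · rw [if_pos hcase]
    have hbk : b + kn ≤ 32 := by omega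
    rw [hshift1, pv_band_mask, Int.shiftRight_eq_div_pow, hb_toNat]
    rw [show ((2 ^ b : Nat) : Int) = (2:Int) ^ b by push_cast; ring]
    rw [pv_slice_word words w b kn hbk]
    rw [pv_slice_chain words o w b kn hwb hbk i (by omega)]
    rfl
  · rw [if_neg hcase]
    have hbk : 32 < b + kn := by omega
    set r : Nat := 32 - b with hrdef
    have hwlt : w < i := by
      rcases Nat.lt_or_ge w i with h | h
      · exact h
      · exfalso; omega
    -- lower bits
    have hr_toNat : ((32 : Int) - ((b : Nat) : Int)).toNat = r := by omega
    have hlower_mask : ((1 : Int) <<< ((32 : Int) - ((b : Nat) : Int)).toNat) - 1 = (2:Int) ^ r - 1 := by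
      rw [hr_toNat, Int.shiftLeft_eq]; ring
    rw [hlower_mask, pv_band_mask, Int.shiftRight_eq_div_pow, hb_toNat]
    rw [show ((2 ^ b : Nat) : Int) = (2:Int) ^ b by push_cast; ring]
    rw [pv_slice_word words w b r (by omega)]
    rw [pv_slice_chain words o w b r hwb (by omega) i (by omega)]
    -- upper bits
    set c2 : Nat := kn - r with hc2def
    have hc2_toNat : (((kn : Nat) : Int) - ((32 : Int) - ((b : Nat) : Int))).toNat = c2 := by omega
    have hupper_mask : ((1 : Int) <<< (((kn : Nat) : Int) - ((32 : Int) - ((b : Nat) : Int))).toNat) - 1 = (2:Int) ^ c2 - 1 := by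
      rw [hc2_toNat, Int.shiftLeft_eq]; ring
    have hw1 : (((w : Nat) : Int)) + 1 = (((w + 1 : Nat) : Nat) : Int) := by push_cast; ring
    rw [hupper_mask, hw1, pv_band_mask]
    have hupper : PySem.List.pyGetD words (((w + 1 : Nat) : Int)) 0 % (2:Int) ^ c2
        = ((pvW words (w + 1) % 2 ^ c2 : Nat) : Int) := by
      have := pv_slice_word words (w + 1) 0 c2 (by omega)
      simpa using this
    rw [hupper]
    have hU : pvW words (w + 1) % 2 ^ c2 = pvT words (i + 1) / 2 ^ (o + r) % 2 ^ c2 := by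
      have h1 : pvW words (w + 1) = pvT words (i + 1) / 2 ^ (32 * (w + 1)) % 2 ^ 32 :=
        pvW_slice words (by omega)
      rw [h1, show 32 * (w + 1) = o + r by omega]
      exact Nat.mod_mod_of_dvd _ (pow_dvd_pow 2 (by omega))
    rw [hU]
    -- combine
    rw [hr_toNat, Int.shiftLeft_eq, PySem.Int.bor_comm]
    set U : Nat := pvT words (i + 1) / 2 ^ (o + r) % 2 ^ c2 with hUdef
    set L : Nat := pvT words (i + 1) / 2 ^ o % 2 ^ r with hLdef
    have hLlt : L < 2 ^ r := Nat.mod_lt _ (by positivity)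
    have hcomb : PySem.Int.bor ((L : Nat) : Int) (((U : Nat) : Int) * (2:Int) ^ r)
        = ((L : Nat) : Int) + ((U : Nat) : Int) * (2:Int) ^ r := by
      apply pv_bor_eq_add _ _ _ (by positivity) _ (by positivity)
      have : ((2 ^ r : Nat) : Int) = (2:Int) ^ r := by push_cast; ring
      omega
    rw [hcomb]
    have hpow : (2:Nat) ^ kn = 2 ^ (r + c2) := by rw [show kn = r + c2 by omega]
    have hsplit : pvRef words kn i = L + 2 ^ r * U := by
      unfold pvRef
      rw [hpow]
      exact pv_ext_split (pvT words (i + 1)) o r c2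
    rw [hsplit]
    push_cast
    ring

lemma pv_band_word (words : List Int) (t : Nat) :
    PySem.Int.band (PySem.List.pyGetD words ((t : Nat) : Int) 0) 4294967295 = ((pvW words t : Nat) : Int) := by
  rw [show (4294967295 : Int) = (2:Int) ^ 32 - 1 by norm_num, pv_band_mask]
  unfold pvW
  have := Int.emod_nonneg (PySem.List.pyGetD words ((t : Nat) : Int) 0) (show (4294967296:Int) ≠ 0 by norm_num)
  rw [show (2:Int) ^ 32 = 4294967296 by norm_num]
  omega

lemma pv_buffer_step (words : List Int) (e jn : Nat) (he : e ≤ 32 * jn) :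
    pvT words (jn + 1) / 2 ^ e = pvT words jn / 2 ^ e + pvW words jn * 2 ^ (32 * jn - e) := by
  have h1 : pvT words (jn + 1) = pvT words jn + (pvW words jn * 2 ^ (32 * jn - e)) * 2 ^ e := by
    show pvT words jn + pvW words jn * 2 ^ (32 * jn) = _
    rw [mul_assoc, ← pow_add, show 32 * jn - e + e = 32 * jn by omega]
  rw [h1, Nat.add_mul_div_right _ _ (Nat.two_pow_pos e)]

lemma pv_buffer_lt (words : List Int) (e jn : Nat) (he : e ≤ 32 * jn) :
    pvT words jn / 2 ^ e < 2 ^ (32 * jn - e) := by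
  apply Nat.div_lt_of_lt_mul
  calc pvT words jn < 2 ^ (32 * jn) := pvT_lt words jn
    _ = 2 ^ e * 2 ^ (32 * jn - e) := by rw [← pow_add]; congr 1; omega

lemma pvFill_spec (words : List Int) (kn : Nat) (i : Nat) (jn : Nat) (hj : i * kn ≤ 32 * jn) :
    ∃ j' : Nat, jn ≤ j' ∧ i * kn + kn ≤ 32 * j' ∧
      pvFill words ((kn : Nat) : Int) (((pvT words jn / 2 ^ (i * kn) : Nat) : Int))
        (((32 * jn : Nat) : Int) - ((i * kn : Nat) : Int)) ((jn : Nat) : Int)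
      = ((((pvT words j' / 2 ^ (i * kn) : Nat) : Int)),
         ((32 * j' : Nat) : Int) - ((i * kn : Nat) : Int), ((j' : Nat) : Int)) := by
  set e : Nat := i * kn with hedef
  clear_value e
  suffices H : ∀ (d jn : Nat), e + kn ≤ 32 * jn + d → e ≤ 32 * jn → ∃ j' : Nat, jn ≤ j' ∧ e + kn ≤ 32 * j' ∧
      pvFill words ((kn : Nat) : Int) (((pvT words jn / 2 ^ e : Nat) : Int))
        (((32 * jn : Nat) : Int) - ((e : Nat) : Int)) ((jn : Nat) : Int)
      = ((((pvT words j' / 2 ^ e : Nat) : Int)),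
         ((32 * j' : Nat) : Int) - ((e : Nat) : Int), ((j' : Nat) : Int)) by
    exact H (e + kn) jn (by omega) hj
  intro d
  induction d with
  | zero =>
    intro jn hd hj2
    refine ⟨jn, le_rfl, by omega, ?_⟩
    rw [pvFill, if_neg (by push_cast; omega)]
  | succ d ih =>
    intro jn hd hj2
    by_cases hfill : 32 * jn < e + kn
    · rw [pvFill, if_pos (by push_cast; omega)]
      have harg1 : PySem.Int.bor (((pvT words jn / 2 ^ e : Nat) : Int))
          ((PySem.Int.band (PySem.List.pyGetD words ((jn : Nat) : Int) 0) 4294967295)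
            <<< ((((32 * jn : Nat) : Int) - ((e : Nat) : Int)).toNat))
          = (((pvT words (jn + 1) / 2 ^ e : Nat) : Int)) := by
        rw [pv_band_word, show ((((32 * jn : Nat) : Int) - ((e : Nat) : Int)).toNat) = 32 * jn - e by omega,
            Int.shiftLeft_eq]
        have hlt := pv_buffer_lt words e jn hj2
        have hcast2 : ((2 ^ (32 * jn - e) : Nat) : Int) = (2:Int) ^ (32 * jn - e) := by push_cast; ring
        rw [pv_bor_eq_add _ _ _ (by positivity) (by omega) (by positivity)]
        rw [pv_buffer_step words e jn hj2]
        push_cast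
        ring
      have harg2 : (((32 * jn : Nat) : Int) - ((e : Nat) : Int)) + 32
          = ((32 * (jn + 1) : Nat) : Int) - ((e : Nat) : Int) := by push_cast; ring
      have harg3 : ((jn : Nat) : Int) + 1 = (((jn + 1 : Nat) : Nat) : Int) := by push_cast; ring
      rw [harg1, harg2, harg3]
      obtain ⟨j', h1, h2, h3⟩ := ih (jn + 1) (by omega) (by omega)
      exact ⟨j', by omega, h2, h3⟩
    · rw [pvFill, if_neg (by push_cast; omega)]
      exact ⟨jn, le_rfl, by omega, rfl⟩

lemma pv_band_buf (x : Nat) (kn : Nat) :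
    PySem.Int.band ((x : Nat) : Int) (((1 : Int) <<< kn) - 1) = ((x % 2 ^ kn : Nat) : Int) := by
  rw [show ((1 : Int) <<< kn) - 1 = (2:Int) ^ kn - 1 by rw [Int.shiftLeft_eq]; ring, pv_band_mask]
  push_cast
  ring

lemma pvB_fold (words : List Int) (kn : Nat) (hk : kn ≤ 32) (m : Nat) :
    ∃ j' : Nat, m * kn ≤ 32 * j' ∧
      ((List.range m).foldl
        (fun (st : Int × Int × Int × List Int) (_ : Nat) =>
          let f := pvFill words ((kn : Nat) : Int) st.1 st.2.1 st.2.2.1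
          (f.1 >>> kn, f.2.1 - ((kn : Nat) : Int), f.2.2,
           st.2.2.2 ++ [PySem.Int.band f.1 (((1 : Int) <<< kn) - 1)]))
        ((0 : Int), (0 : Int), (0 : Int), ([] : List Int)))
      = ((((pvT words j' / 2 ^ (m * kn) : Nat) : Int)),
         ((32 * j' : Nat) : Int) - ((m * kn : Nat) : Int), ((j' : Nat) : Int),
         (List.range m).map (fun i => ((pvRef words kn i : Nat) : Int))) := by
  induction m with
  | zero =>
    exact ⟨0, by omega, by norm_num [pvT]⟩
  | succ m ih =>
    obtain ⟨jm, hjm2, hfold⟩ := ih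
    rw [List.range_succ, List.foldl_append, hfold]
    obtain ⟨j', hj1, hj2, hfill⟩ := pvFill_spec words kn m jm hjm2
    have hexp : (m + 1) * kn = m * kn + kn := by ring
    refine ⟨j', by omega, ?_⟩
    simp only [List.foldl_cons, List.foldl_nil]
    rw [hfill]
    have hbuf : (((pvT words j' / 2 ^ (m * kn) : Nat) : Int)) >>> kn
        = (((pvT words j' / 2 ^ ((m + 1) * kn) : Nat) : Int)) := by
      rw [Int.shiftRight_eq_div_pow, ← Int.natCast_div, Nat.div_div_eq_div_mul, ← pow_add,
          show m * kn + kn = (m + 1) * kn by ring]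
    have hbits : (((32 * j' : Nat) : Int) - ((m * kn : Nat) : Int)) - ((kn : Nat) : Int)
        = ((32 * j' : Nat) : Int) - (((m + 1) * kn : Nat) : Int) := by push_cast; ring
    have hval : PySem.Int.band (((pvT words j' / 2 ^ (m * kn) : Nat) : Int)) (((1 : Int) <<< kn) - 1)
        = ((pvRef words kn m : Nat) : Int) := by
      rw [pv_band_buf, pvRef_stream words kn hk m hj2]
    rw [hbuf, hbits, hval]
    simp


lemma pvA_eq (words : List Int) (kn : Nat) (hk : kn ≤ 32) (n : Int) :
    decompress_crossing_py words ((kn : Nat) : Int) n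
      = (List.range n.toNat).map (fun i => ((pvRef words kn i : Nat) : Int)) := by
  unfold decompress_crossing_py
  simp only [Int.toNat_natCast]
  rw [PySem.List.pyRange_one 0 n, List.foldl_map, PySem.List.foldl_append_singleton_eq_map]
  rw [List.nil_append, show (n - 0).toNat = n.toNat by omega]
  apply List.map_congr_left
  intro i _
  rw [zero_add]
  exact pvA_value words kn hk i

lemma pvB_eq (words : List Int) (kn : Nat) (hk : kn ≤ 32) (n : Int) :
    decompress_crossing_py_alt words ((kn : Nat) : Int) n
      = (List.range n.toNat).map (fun i => ((pvRef words kn i : Nat) : Int)) := by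
  unfold decompress_crossing_py_alt
  simp only [Int.toNat_natCast]
  rw [PySem.List.pyRange_one 0 n, List.foldl_map]
  rw [show (n - 0).toNat = n.toNat by omega]
  obtain ⟨j', _, hfold⟩ := pvB_fold words kn hk n.toNat
  rw [hfold]

-- ===== VERDICT (by name: the statement is the Claim_ definition above) =====
theorem decompress_crossing_py_spec : Claim_equal_decompress_crossing_py := by
  intro words k n _ hpre
  obtain ⟨hk0, hk32, -⟩ := hpre
  unfold Spec_decompress_crossing_py
  lift k to Nat using hk0 with kn
  have hk : kn ≤ 32 := by omega
  rw [pvA_eq words kn hk n, pvB_eq words kn hk n]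

@[simp]
theorem decompress_crossing_py_raises : Claim_raises_decompress_crossing_py := by
  unfold Claim_raises_decompress_crossing_py
  refine ⟨?_, by decide, by decide, ?_⟩
  · intro words k n _ hra hpre
    obtain ⟨hw, hk, hn⟩ := hra
    obtain ⟨_, _, hpre3⟩ := hpre
    have := hpre3 hn
    simp [hk, hw] at this
  · show decompress_crossing_py_alt [] 0 2 = [0, 0]
    unfold decompress_crossing_py_alt
    rw [show PySem.List.pyRange 0 2 1 = [0, 1] by decide]
    simp only [List.foldl]
    rw [pvFill, pvFill]
    norm_num [PySem.Int.band]
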